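-- pv_equiv track=rewrite | github.com/Katokoda/OG_QML | TextShortener.py | extractCapitals
-- ===== SOURCE A (Python) =====
-- def extractCapitals(s: str):
--     # extractCapitals was coded entirely by ChatGPT
--
--     # Extract all uppercase letters
--     capitals = ''.join([char for char in s if char.isupper()])
--
--     # Find the trailing lowercase-only segment (after last uppercase)
--     last_upper_index = -1
--     for i in range(len(s) - 1, -1, -1):
--         if s[i].isupper():
--             last_upper_index = i
--             break
--
--     # If no uppercase found, return empty capitals + full string
--     tail = s[last_upper_index + 1:]
--
--     return capitals + tail
-- ===== SOURCE B (Python) =====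
-- def extractCapitals(s: str):
--     # Single forward pass: collect uppercase letters; tail resets at each uppercase.
--     capitals = ''
--     tail = ''
--     for char in s:
--         if char.isupper():
--             capitals += char
--             tail = ''
--         else:
--             tail += char
--     return capitals + tail
-- ===== Notes on version B (the rewrite author's own statement) =====
-- stated objective: simpler
-- what changed: Replaces A's three passes (filter for capitals, a reverse index scan for the last uppercase, and a slice) with one forward pass keeping two accumulators, the tail being reset at every uppercase character.
import Mathlib
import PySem

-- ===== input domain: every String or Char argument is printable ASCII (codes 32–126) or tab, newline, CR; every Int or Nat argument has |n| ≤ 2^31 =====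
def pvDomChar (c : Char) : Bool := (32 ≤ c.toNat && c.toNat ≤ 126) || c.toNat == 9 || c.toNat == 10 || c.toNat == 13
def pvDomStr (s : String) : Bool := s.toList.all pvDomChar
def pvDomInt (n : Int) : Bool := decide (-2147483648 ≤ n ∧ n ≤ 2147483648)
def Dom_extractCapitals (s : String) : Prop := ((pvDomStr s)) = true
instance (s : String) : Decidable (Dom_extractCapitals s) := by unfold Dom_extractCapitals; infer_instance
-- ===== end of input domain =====

-- B replaces A's three passes (filter, reverse index scan for the last uppercase, slice)
-- by one forward pass with two accumulators (objective: simpler).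

-- ===== PORT A =====
-- the 'for i in range(len(s)-1,-1,-1): if s[i].isupper(): last_upper_index = i; break' loop
def lastUpperLoop (s : List Char) : List Int → Int
  | [] => -1
  | i :: rest =>
    match PySem.List.pyGet? s i with
    | some c => if PySem.Chars.isupper c then i else lastUpperLoop s rest
    | none => lastUpperLoop s rest   -- unreachable: every index produced by the range is in bounds

def extractCapitals (s : String) : String :=
  let l := s.toList
  let capitals := l.filter PySem.Chars.isupper
  let lastUpperIndex := lastUpperLoop l (PySem.List.pyRange ((l.length : Int) - 1) (-1) (-1))
  let tail := PySem.List.slice l (some (lastUpperIndex + 1)) none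
  String.mk (capitals ++ tail)

-- ===== PORT B =====
def extractCapitals_alt (s : String) : String :=
  let p := s.toList.foldl
    (fun (p : List Char × List Char) c =>
      if PySem.Chars.isupper c then (p.1 ++ [c], []) else (p.1, p.2 ++ [c]))
    ([], [])
  String.mk (p.1 ++ p.2)

-- ===== PRECONDITION & SPEC =====
def Spec_extractCapitals (s : String) (out : String) : Prop := out = extractCapitals_alt s
instance (s : String) (out : String) : Decidable (Spec_extractCapitals s out) := by unfold Spec_extractCapitals; infer_instance

-- ===== CLAIM (what is proved, stated in full; the proofs are below) =====
def Claim_equal_extractCapitals : Prop := ∀ (s : String), Dom_extractCapitals s → Spec_extractCapitals s (extractCapitals s)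

-- ===== LEMMAS AND PROOFS =====

-- B's loop step, named for the proofs (definitionally the lambda in extractCapitals_alt)
def pvStep (p : List Char × List Char) (c : Char) : List Char × List Char :=
  if PySem.Chars.isupper c then (p.1 ++ [c], []) else (p.1, p.2 ++ [c])

theorem pvFoldB_fst (l : List Char) (c0 t0 : List Char) :
    (l.foldl pvStep (c0, t0)).1 = c0 ++ l.filter PySem.Chars.isupper := by
  induction l generalizing c0 t0 with
  | nil => simp
  | cons c l ih =>
    simp only [List.foldl_cons, List.filter_cons, pvStep]
    by_cases h : PySem.Chars.isupper c = true
    · simp [h, ih]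
    · simp [h, ih]

-- the descending range, characterised
theorem pvRange_desc_eq (n : Nat) :
    PySem.List.pyRange ((n : Int) - 1) (-1) (-1)
      = (List.range n).map (fun k : Nat => ((n : Int) - 1 - (k : Int))) := by
  rcases Nat.eq_zero_or_pos n with h | h
  · subst h
    simp [PySem.List.pyRange]
  · have h1 : (-1 : Int) < (n : Int) - 1 := by omega
    have hstep : ¬ ((-1 : Int) = 0) := by norm_num
    have hpos : ¬ ((0 : Int) < -1) := by norm_num
    simp only [PySem.List.pyRange, if_neg hstep, if_neg hpos, if_pos h1]
    have hcount : (((n : Int) - 1 - -1 + - -1 - 1) / - -1).toNat = n := by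
      have : ((n : Int) - 1 - -1 + - -1 - 1) / - -1 = (n : Int) := by norm_num
      rw [this]; omega
    rw [hcount]
    apply List.map_congr_left
    intro k _
    push_cast
    ring

theorem pvRange_desc_mem (n : Nat) (i : Int)
    (h : i ∈ PySem.List.pyRange ((n : Int) - 1) (-1) (-1)) : 0 ≤ i ∧ i < n := by
  rw [pvRange_desc_eq] at h
  obtain ⟨k, hk, heq⟩ := List.mem_map.mp h
  have := List.mem_range.mp hk
  omega

theorem pvLastUpperLoop_mem_or (s : List Char) (idxs : List Int) :
    lastUpperLoop s idxs = -1 ∨ lastUpperLoop s idxs ∈ idxs := by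
  induction idxs with
  | nil => left; rfl
  | cons i rest ih =>
    simp only [lastUpperLoop]
    cases h : PySem.List.pyGet? s i with
    | none =>
      rcases ih with h' | h'
      · left; exact h'
      · right; exact List.mem_cons_of_mem _ h'
    | some c =>
      by_cases hu : PySem.Chars.isupper c = true
      · right; simp [hu]
      · simp only [hu, Bool.false_eq_true, if_false]
        rcases ih with h' | h'
        · left; exact h'
        · right; exact List.mem_cons_of_mem _ h'

theorem pvLastUpper_bounds (l : List Char) :
    -1 ≤ lastUpperLoop l (PySem.List.pyRange ((l.length : Int) - 1) (-1) (-1)) ∧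
    lastUpperLoop l (PySem.List.pyRange ((l.length : Int) - 1) (-1) (-1)) < (l.length : Int) := by
  rcases pvLastUpperLoop_mem_or l (PySem.List.pyRange ((l.length : Int) - 1) (-1) (-1)) with h | h
  · constructor <;> omega
  · have := pvRange_desc_mem l.length _ h
    omega

-- the loop only reads indices of the list it is given; appending past them changes nothing
theorem pvLastUpperLoop_append (l : List Char) (c : Char) (idxs : List Int)
    (hb : ∀ i ∈ idxs, 0 ≤ i ∧ i < (l.length : Int)) :
    lastUpperLoop (l ++ [c]) idxs = lastUpperLoop l idxs := by
  induction idxs with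
  | nil => rfl
  | cons i rest ih =>
    have hi := hb i (List.mem_cons_self ..)
    have hget : PySem.List.pyGet? (l ++ [c]) i = PySem.List.pyGet? l i := by
      obtain ⟨k, hk⟩ : ∃ k : Nat, i = (k : Int) := ⟨i.toNat, by omega⟩
      subst hk
      have hk' : k < l.length := by exact_mod_cast hi.2
      rw [PySem.List.pyGet?_natCast, PySem.List.pyGet?_natCast,
        List.getElem?_append_left hk']
    simp only [lastUpperLoop, hget]
    cases PySem.List.pyGet? l i with
    | none => exact ih (fun j hj => hb j (List.mem_cons_of_mem _ hj))
    | some d =>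
      by_cases hu : PySem.Chars.isupper d = true
      · simp [hu]
      · simp only [hu, Bool.false_eq_true, if_false]
        exact ih (fun j hj => hb j (List.mem_cons_of_mem _ hj))

-- A's tail, as a function of the character list
def pvTailA (l : List Char) : List Char :=
  PySem.List.slice l
    (some (lastUpperLoop l (PySem.List.pyRange ((l.length : Int) - 1) (-1) (-1)) + 1)) none

theorem pvTailA_eq_drop (l : List Char) :
    pvTailA l = l.drop (lastUpperLoop l (PySem.List.pyRange ((l.length : Int) - 1) (-1) (-1)) + 1).toNat := by
  unfold pvTailA
  exact PySem.List.slice_from l (by have := (pvLastUpper_bounds l).1; omega)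

theorem pvRange_desc_snoc (n : Nat) :
    PySem.List.pyRange (((n + 1 : Nat) : Int) - 1) (-1) (-1)
      = (n : Int) :: PySem.List.pyRange ((n : Int) - 1) (-1) (-1) := by
  rw [pvRange_desc_eq (n + 1), pvRange_desc_eq n, List.range_succ_eq_map,
    List.map_cons, List.map_map]
  congr 1
  · push_cast; ring
  · apply List.map_congr_left
    intro k _
    simp only [Function.comp_apply, Nat.succ_eq_add_one]
    push_cast; ring

theorem pvTailA_snoc (l : List Char) (c : Char) :
    pvTailA (l ++ [c]) = if PySem.Chars.isupper c then [] else pvTailA l ++ [c] := by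
  have hlen : (((l ++ [c]).length : Nat) : Int) - 1 = (((l.length + 1 : Nat)) : Int) - 1 := by
    simp
  rw [pvTailA_eq_drop, pvTailA_eq_drop, hlen, pvRange_desc_snoc l.length]
  have hget : PySem.List.pyGet? (l ++ [c]) ((l.length : Nat) : Int) = some c := by
    rw [PySem.List.pyGet?_natCast, List.getElem?_append_right (le_refl _)]
    simp
  simp only [lastUpperLoop, hget]
  by_cases hu : PySem.Chars.isupper c = true
  · simp only [hu, if_true]
    have h1 : ((l.length : Int) + 1).toNat = l.length + 1 := by omega
    rw [h1]
    simp
  · simp only [hu, Bool.false_eq_true, if_false]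
    rw [pvLastUpperLoop_append l c _ (fun i hi => pvRange_desc_mem l.length i hi)]
    have hb := pvLastUpper_bounds l
    have hle : (lastUpperLoop l (PySem.List.pyRange ((l.length : Int) - 1) (-1) (-1)) + 1).toNat ≤ l.length := by
      omega
    rw [List.drop_append_of_le_length hle]

theorem pvFoldB_snd (l : List Char) :
    (l.foldl pvStep ([], [])).2 = pvTailA l := by
  induction l using List.reverseRecOn with
  | nil => decide
  | append_singleton l c ih =>
    rw [List.foldl_append, pvTailA_snoc]
    simp only [List.foldl_cons, List.foldl_nil, pvStep]
    by_cases hu : PySem.Chars.isupper c = true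
    · simp [hu]
    · simp [hu, ih]

theorem pvMain (l : List Char) :
    l.filter PySem.Chars.isupper ++
      PySem.List.slice l
        (some (lastUpperLoop l (PySem.List.pyRange ((l.length : Int) - 1) (-1) (-1)) + 1)) none
    = (l.foldl pvStep ([], [])).1 ++ (l.foldl pvStep ([], [])).2 := by
  rw [pvFoldB_fst, pvFoldB_snd]
  simp [pvTailA]

-- ===== VERDICT (by name: the statement is the Claim_ definition above) =====
theorem extractCapitals_spec : Claim_equal_extractCapitals := by
  intro s _
  unfold Spec_extractCapitals
  have hB : extractCapitals_alt s
      = String.mk ((s.toList.foldl pvStep ([], [])).1 ++ (s.toList.foldl pvStep ([], [])).2) := rfl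
  have hA : extractCapitals s
      = String.mk (s.toList.filter PySem.Chars.isupper ++
          PySem.List.slice s.toList
            (some (lastUpperLoop s.toList
              (PySem.List.pyRange ((s.toList.length : Int) - 1) (-1) (-1)) + 1)) none) := rfl
  rw [hA, hB, pvMain]
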